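-- pv_equiv track=rewrite | github.com/livingstaccato/provide-foundation | mutants/src/provide/foundation/errors/context.py | x__group_foundation_error_context__mutmut_9
-- ===== SOURCE A (Python) =====
-- from typing import Any
--
-- def x__group_foundation_error_context__mutmut_9(error_context: dict[str, Any]) -> dict[str, dict[str, Any]]:
--     """Group FoundationError context items by namespace."""
--     grouped: dict[str, dict[str, Any]] = {}
--
--     for key, value in error_context.items():
--         if "." in key:
--             namespace, subkey = key.rsplit(".", 1)
--             if namespace not in grouped:
--                 grouped[namespace] = {}
--             grouped[namespace][subkey] = value
--         else:
--             # Put non-namespaced items in 'context' namespace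
--             if "context" not in grouped:
--                 grouped["context"] = {}
--             grouped["context"][key] = value
--
--     return grouped
-- ===== SOURCE B (Python) =====
-- def x__group_foundation_error_context__mutmut_9(error_context):
--     """Group FoundationError context items by namespace (two-phase: map to
--     (namespace, subkey, value) triples, then build each group by filtering)."""
--     def triple(key, value):
--         if "." in key:
--             ns, sk = key.rsplit(".", 1)
--             return ns, sk, value
--         return "context", key, value
--
--     triples = [triple(k, v) for k, v in error_context.items()]
--     namespaces = dict.fromkeys(ns for ns, _, _ in triples)
--     return {ns: {sk: v for ns2, sk, v in triples if ns2 == ns}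
--             for ns in namespaces}
-- ===== Notes on version B (the rewrite author's own statement) =====
-- stated objective: alternative
-- what changed: Replaces A's single pass that mutates a dict-of-dicts in place by a two-phase decomposition: map every item to a (namespace, subkey, value) triple, dedup the namespaces in first-occurrence order, then build each group's inner dict by a comprehension filtering the triples.
import Mathlib
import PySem

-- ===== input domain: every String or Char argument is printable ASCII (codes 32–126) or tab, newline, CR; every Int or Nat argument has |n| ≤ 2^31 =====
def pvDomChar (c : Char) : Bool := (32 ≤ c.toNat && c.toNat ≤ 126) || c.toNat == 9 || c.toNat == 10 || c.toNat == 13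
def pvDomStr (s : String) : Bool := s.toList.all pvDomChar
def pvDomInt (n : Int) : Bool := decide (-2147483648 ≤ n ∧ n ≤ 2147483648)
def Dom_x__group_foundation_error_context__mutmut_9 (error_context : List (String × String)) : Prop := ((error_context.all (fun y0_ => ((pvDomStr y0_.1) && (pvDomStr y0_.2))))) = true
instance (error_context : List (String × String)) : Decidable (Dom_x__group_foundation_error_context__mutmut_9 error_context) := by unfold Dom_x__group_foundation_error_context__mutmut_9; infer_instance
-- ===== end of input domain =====

-- B replaces A's single mutating pass over a dict-of-dicts by a two-phase decomposition
-- (map keys to (namespace, subkey, value) triples, dedup the namespaces, then build each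
-- group by filtering the triples); objective: alternative structure, not speed.

-- ===== PORT A =====
-- key.rsplit(".", 1), only called under the guard '"." in key': splits at the LAST '.'.
-- Hand-ported (PySem has no rsplit-with-maxsplit): exact because under the guard
-- PySem.Chars.rfind returns the index of the last '.', and take/drop reproduce the two pieces.
def pyRsplitDot1 (k : String) : String × String :=
  let cs := k.toList
  let i := (PySem.Chars.rfind cs ['.']).toNat
  (String.ofList (cs.take i), String.ofList (cs.drop (i + 1)))

def x__group_foundation_error_context__mutmut_9 (error_context : List (String × String)) : List (String × List (String × String)) :=
  let grouped : PySem.Dict String (PySem.Dict String String) :=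
    error_context.foldl (fun grouped kv =>
      if PySem.Str.isIn "." kv.1 then
        let p := pyRsplitDot1 kv.1
        -- if namespace not in grouped: grouped[namespace] = {}
        let grouped := if grouped.contains p.1 then grouped else grouped.insert p.1 PySem.Dict.empty
        -- grouped[namespace][subkey] = value  (namespace is present; dflt never used)
        grouped.modify p.1 PySem.Dict.empty (fun d => d.insert p.2 kv.2)
      else
        let grouped := if grouped.contains "context" then grouped else grouped.insert "context" PySem.Dict.empty
        grouped.modify "context" PySem.Dict.empty (fun d => d.insert kv.1 kv.2))
      PySem.Dict.empty
  grouped.items.map (fun p => (p.1, p.2.items))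

-- ===== PORT B =====
def pvTriple (kv : String × String) : String × String × String :=
  if PySem.Str.isIn "." kv.1 then
    let p := pyRsplitDot1 kv.1
    (p.1, p.2, kv.2)
  else
    ("context", kv.1, kv.2)

def x__group_foundation_error_context__mutmut_9_alt (error_context : List (String × String)) : List (String × List (String × String)) :=
  let triples := error_context.map pvTriple
  let namespaces := PySem.List.dedup (triples.map (·.1))   -- dict.fromkeys
  namespaces.map (fun ns =>
    (ns, (triples.foldl (fun d t => if t.1 == ns then d.insert t.2.1 t.2.2 else d)
            PySem.Dict.empty).items))

-- ===== PRECONDITION & SPEC =====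
def Spec_x__group_foundation_error_context__mutmut_9 (error_context : List (String × String)) (out : List (String × List (String × String))) : Prop := out = x__group_foundation_error_context__mutmut_9_alt error_context
instance (error_context : List (String × String)) (out : List (String × List (String × String))) : Decidable (Spec_x__group_foundation_error_context__mutmut_9 error_context out) := by unfold Spec_x__group_foundation_error_context__mutmut_9; infer_instance

-- ===== CLAIM (what is proved, stated in full; the proofs are below) =====
def Claim_equal_x__group_foundation_error_context__mutmut_9 : Prop := ∀ (error_context : List (String × String)), Dom_x__group_foundation_error_context__mutmut_9 error_context → Spec_x__group_foundation_error_context__mutmut_9 error_context (x__group_foundation_error_context__mutmut_9 error_context)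

-- ===== LEMMAS AND PROOFS =====

-- the canonical per-item step, over a triple
def pvStep (g : PySem.Dict String (PySem.Dict String String)) (t : String × String × String) :
    PySem.Dict String (PySem.Dict String String) :=
  g.insert t.1 ((g.getD t.1 PySem.Dict.empty).insert t.2.1 t.2.2)

lemma pvCondModify (g : PySem.Dict String (PySem.Dict String String)) (k sk v : String) :
    ((if g.contains k then g else g.insert k PySem.Dict.empty).modify k PySem.Dict.empty
        (fun d => d.insert sk v))
      = pvStep g (k, sk, v) := by
  by_cases h : g.contains k
  · simp only [h, if_true]; rfl
  · simp only [h]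
    show (g.insert k PySem.Dict.empty).insert k
        (((g.insert k PySem.Dict.empty).getD k PySem.Dict.empty).insert sk v)
      = g.insert k ((g.getD k PySem.Dict.empty).insert sk v)
    rw [PySem.Dict.insert_insert_self, PySem.Dict.getD_insert_self,
        PySem.Dict.getD_of_not_contains _ _ (by simpa using h)]

lemma pvStepA_eq (g : PySem.Dict String (PySem.Dict String String)) (kv : String × String) :
    (if PySem.Str.isIn "." kv.1 then
        let p := pyRsplitDot1 kv.1
        let g' := if g.contains p.1 then g else g.insert p.1 PySem.Dict.empty
        g'.modify p.1 PySem.Dict.empty (fun d => d.insert p.2 kv.2)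
      else
        let g' := if g.contains "context" then g else g.insert "context" PySem.Dict.empty
        g'.modify "context" PySem.Dict.empty (fun d => d.insert kv.1 kv.2))
      = pvStep g (pvTriple kv) := by
  by_cases h : PySem.Str.isIn "." kv.1
  · simp only [pvTriple, h, if_true]
    exact pvCondModify g _ _ _
  · simp only [pvTriple, h]
    exact pvCondModify g _ _ _

lemma pvGetD_fold (ts : List (String × String × String))
    (g : PySem.Dict String (PySem.Dict String String)) (ns : String) :
    (ts.foldl pvStep g).getD ns PySem.Dict.empty
      = ts.foldl (fun d t => if t.1 == ns then d.insert t.2.1 t.2.2 else d)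
          (g.getD ns PySem.Dict.empty) := by
  induction ts generalizing g with
  | nil => rfl
  | cons t ts ih =>
    simp only [List.foldl_cons, ih]
    congr 1
    by_cases h : t.1 = ns
    · subst h
      simp [pvStep, PySem.Dict.getD_insert_self]
    · have hb : (t.1 == ns) = false := by simpa using h
      simp only [pvStep, hb]
      exact PySem.Dict.getD_insert_of_ne _ _ _ (Ne.symm h)

lemma pvKeys_fold (ts : List (String × String × String)) :
    (ts.foldl pvStep PySem.Dict.empty).keys = PySem.List.dedup (ts.map (·.1)) := by
  have h := PySem.Dict.keys_foldl_insert_key ts (fun t => t.1)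
      (fun g t => (g.getD t.1 PySem.Dict.empty).insert t.2.1 t.2.2) PySem.Dict.empty
  show (ts.foldl (fun g t => g.insert t.1 ((g.getD t.1 PySem.Dict.empty).insert t.2.1 t.2.2))
      PySem.Dict.empty).keys = _
  rw [h, PySem.Dict.keys_empty, PySem.List.dedup_eq_ofList]
  rfl

lemma pvNodup_fold (ts : List (String × String × String)) :
    (ts.foldl pvStep PySem.Dict.empty).keys.Nodup := by
  exact PySem.Dict.nodup_keys_foldl_insert_key ts (fun t => t.1)
      (fun g t => (g.getD t.1 PySem.Dict.empty).insert t.2.1 t.2.2) PySem.Dict.empty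
      PySem.Dict.nodup_keys_empty

theorem pv_main (error_context : List (String × String)) :
    x__group_foundation_error_context__mutmut_9 error_context
      = x__group_foundation_error_context__mutmut_9_alt error_context := by
  show (error_context.foldl (fun grouped kv =>
      if PySem.Str.isIn "." kv.1 then
        let p := pyRsplitDot1 kv.1
        let grouped := if grouped.contains p.1 then grouped else grouped.insert p.1 PySem.Dict.empty
        grouped.modify p.1 PySem.Dict.empty (fun d => d.insert p.2 kv.2)
      else
        let grouped := if grouped.contains "context" then grouped else grouped.insert "context" PySem.Dict.empty
        grouped.modify "context" PySem.Dict.empty (fun d => d.insert kv.1 kv.2))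
      PySem.Dict.empty).items.map (fun p => (p.1, p.2.items))
    = (PySem.List.dedup ((error_context.map pvTriple).map (·.1))).map (fun ns =>
        (ns, ((error_context.map pvTriple).foldl
          (fun d t => if t.1 == ns then d.insert t.2.1 t.2.2 else d) PySem.Dict.empty).items))
  have hfold : (error_context.foldl (fun grouped kv =>
      if PySem.Str.isIn "." kv.1 then
        let p := pyRsplitDot1 kv.1
        let grouped := if grouped.contains p.1 then grouped else grouped.insert p.1 PySem.Dict.empty
        grouped.modify p.1 PySem.Dict.empty (fun d => d.insert p.2 kv.2)
      else
        let grouped := if grouped.contains "context" then grouped else grouped.insert "context" PySem.Dict.empty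
        grouped.modify "context" PySem.Dict.empty (fun d => d.insert kv.1 kv.2))
      PySem.Dict.empty)
      = (error_context.map pvTriple).foldl pvStep PySem.Dict.empty := by
    rw [List.foldl_map]
    exact PySem.List.foldl_congr_mem _ _ _ _ (fun g kv _ => pvStepA_eq g kv)
  rw [hfold]
  set ts := error_context.map pvTriple with hts
  rw [PySem.Dict.items_eq_map_keys _ (pvNodup_fold ts) PySem.Dict.empty]
  rw [List.map_map, pvKeys_fold ts]
  apply List.map_congr_left
  intro ns _
  simp only [Function.comp]
  rw [pvGetD_fold ts PySem.Dict.empty ns, PySem.Dict.getD_empty]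

-- ===== VERDICT (by name: the statement is the Claim_ definition above) =====
theorem x__group_foundation_error_context__mutmut_9_spec : Claim_equal_x__group_foundation_error_context__mutmut_9 := by
  intro ec _
  unfold Spec_x__group_foundation_error_context__mutmut_9
  exact pv_main ec
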